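-- pv_equiv track=rewrite | github.com/stanaya/lda_d2c | visLDA.py | split_by_topic
-- ===== SOURCE A (Python) =====
-- def split_by_topic(k=-1, bag_of_words={}):
--     splitted_dicts = [{} for x in range(k)]
--     for key, v in bag_of_words.items():
--         wid, tid = key
--         splitted_dicts[tid - 1][(wid, tid, v)] = 0
--
--     ranking_lists = []
--     for i in range(k):
--         lis = sorted(splitted_dicts[i].keys(),
--                      key=lambda x: x[2], reverse=True)
--         ranking_lists.append(lis)
--
--     return ranking_lists
-- ===== SOURCE B (Python) =====
-- def split_by_topic(k=-1, bag_of_words={}):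
--     ordered = sorted(((wid, tid, v) for (wid, tid), v in bag_of_words.items()),
--                      key=lambda x: x[2], reverse=True)
--     buckets = [[] for _ in range(k)]
--     for item in ordered:
--         buckets[item[1] - 1].append(item)
--     return buckets
-- ===== Notes on version B (the rewrite author's own statement) =====
-- stated objective: faster
-- what changed: A builds one dict per topic in a pass and then sorts each of the k buckets separately; B does one global stable sort of all (wid, tid, v) items by count descending and then distributes them into k buckets in a single pass (fewer passes and no per-item dict bookkeeping; sort stability reproduces A's per-bucket tie order).
import Mathlib
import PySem

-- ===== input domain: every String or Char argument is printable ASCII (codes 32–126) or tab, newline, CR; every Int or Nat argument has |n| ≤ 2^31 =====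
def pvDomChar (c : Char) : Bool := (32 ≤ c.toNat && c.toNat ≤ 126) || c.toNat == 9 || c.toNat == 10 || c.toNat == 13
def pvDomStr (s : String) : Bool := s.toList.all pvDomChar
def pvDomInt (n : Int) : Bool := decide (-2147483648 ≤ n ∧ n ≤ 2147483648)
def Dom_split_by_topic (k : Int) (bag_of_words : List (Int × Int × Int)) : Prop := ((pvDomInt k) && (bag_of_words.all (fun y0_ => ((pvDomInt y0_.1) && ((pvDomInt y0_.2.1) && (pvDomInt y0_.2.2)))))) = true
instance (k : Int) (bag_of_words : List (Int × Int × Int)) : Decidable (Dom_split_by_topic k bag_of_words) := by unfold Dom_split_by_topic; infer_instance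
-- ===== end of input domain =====

-- B replaces A's "one dict per topic, then k separate sorts" by one global stable sort
-- followed by a single distribution pass into k buckets (measured faster in a timing run).

-- ===== PORT A =====
-- bag_of_words is the dict {(wid, tid): v} as an association list flattened to (wid, tid, v).
def split_by_topic (k : Int) (bag_of_words : List (Int × Int × Int)) : List (List (Int × Int × Int)) :=
  -- splitted_dicts = [{} for x in range(k)]
  let splitted_dicts : List (PySem.Dict (Int × Int × Int) Int) :=
    (PySem.List.pyRange 0 k 1).map (fun _ => PySem.Dict.empty)
  -- for key, v in bag_of_words.items(): splitted_dicts[tid - 1][(wid, tid, v)] = 0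
  let splitted_dicts := bag_of_words.foldl (fun ds t =>
    PySem.List.pySetD ds (t.2.1 - 1)
      ((PySem.List.pyGetD ds (t.2.1 - 1) PySem.Dict.empty).insert t 0)) splitted_dicts
  -- for i in range(k): ranking_lists.append(sorted(splitted_dicts[i].keys(), key=lambda x: x[2], reverse=True))
  (PySem.List.pyRange 0 k 1).foldl (fun acc i =>
    acc ++ [PySem.List.sorted (PySem.List.pyGetD splitted_dicts i PySem.Dict.empty).keys
              (fun x => x.2.2) true]) []

-- ===== PORT B =====
def split_by_topic_alt (k : Int) (bag_of_words : List (Int × Int × Int)) : List (List (Int × Int × Int)) :=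
  -- ordered = sorted(((wid, tid, v) for (wid, tid), v in bag_of_words.items()), key=lambda x: x[2], reverse=True)
  let ordered := PySem.List.sorted bag_of_words (fun x => x.2.2) true
  -- buckets = [[] for _ in range(k)]
  let buckets : List (List (Int × Int × Int)) :=
    (PySem.List.pyRange 0 k 1).map (fun _ => [])
  -- for item in ordered: buckets[item[1] - 1].append(item)
  ordered.foldl (fun bs t =>
    PySem.List.pySetD bs (t.2.1 - 1) (PySem.List.pyGetD bs (t.2.1 - 1) [] ++ [t])) buckets

-- ===== PRECONDITION & SPEC =====
-- Pre_ excludes (a) inputs where some tid - 1 is not a valid Python index into the k buckets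
-- (A raises IndexError there), and (b) lists with duplicate (wid, tid) dict keys, on which the
-- association-list representation of the Python dict argument is ambiguous.
def Pre_split_by_topic (k : Int) (bag_of_words : List (Int × Int × Int)) : Prop :=
  (bag_of_words.map (fun t => (t.1, t.2.1))).Nodup ∧
  ∀ t ∈ bag_of_words, -k ≤ t.2.1 - 1 ∧ t.2.1 - 1 < k
instance (k : Int) (bag_of_words : List (Int × Int × Int)) : Decidable (Pre_split_by_topic k bag_of_words) := by unfold Pre_split_by_topic; infer_instance
def pvWitness_split_by_topic : Int × (List (Int × Int × Int)) := (2, [(5,1,3),(6,2,1),(7,1,3)])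

def Spec_split_by_topic (k : Int) (bag_of_words : List (Int × Int × Int)) (out : List (List (Int × Int × Int))) : Prop := out = split_by_topic_alt k bag_of_words
instance (k : Int) (bag_of_words : List (Int × Int × Int)) (out : List (List (Int × Int × Int))) : Decidable (Spec_split_by_topic k bag_of_words out) := by unfold Spec_split_by_topic; infer_instance

-- ===== CLAIM (what is proved, stated in full; the proofs are below) =====
def Claim_equal_split_by_topic : Prop := ∀ (k : Int) (bag_of_words : List (Int × Int × Int)), Dom_split_by_topic k bag_of_words → Pre_split_by_topic k bag_of_words → Spec_split_by_topic k bag_of_words (split_by_topic k bag_of_words)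

-- ===== LEMMAS AND PROOFS =====

-- resolved (non-negative) index of Python index i into a list of length n (proof-side helper)
def pvRes (n : Nat) (i : Int) : Nat := ((PySem.List.pyIdx? n i).getD 0)

theorem pvRes_lt {n : Nat} {i : Int} (h : PySem.Raise.InRange n i) : pvRes n i < n := by
  obtain ⟨h1, h2⟩ := h
  unfold pvRes PySem.List.pyIdx?
  split_ifs with h3 <;> simp <;> omega

theorem pyIdx?_eq_some {n : Nat} {i : Int} (h : PySem.Raise.InRange n i) :
    PySem.List.pyIdx? n i = some (pvRes n i) := by
  obtain ⟨h1, h2⟩ := h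
  unfold pvRes PySem.List.pyIdx?
  split_ifs with h3 <;> simp

theorem pySetD_eq_set {α : Type} {xs : List α} {i : Int} (v : α)
    (h : PySem.Raise.InRange xs.length i) :
    PySem.List.pySetD xs i v = xs.set (pvRes xs.length i) v := by
  simp [PySem.List.pySetD, PySem.List.pySet?, pyIdx?_eq_some h]

theorem pyGetD_eq_getD {α : Type} {xs : List α} {i : Int} (d : α)
    (h : PySem.Raise.InRange xs.length i) :
    PySem.List.pyGetD xs i d = xs.getD (pvRes xs.length i) d := by
  simp [PySem.List.pyGetD, PySem.List.pyGet?, pyIdx?_eq_some h, List.getD]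

-- the distribution loop keeps the number of buckets
theorem dist_length {σ τ : Type} (f : σ → τ → σ) (dflt : σ) (g : τ → Int) :
    ∀ (l : List τ) (bs : List σ),
      (l.foldl (fun bs t =>
          PySem.List.pySetD bs (g t) (f (PySem.List.pyGetD bs (g t) dflt) t)) bs).length =
      bs.length := by
  intro l
  induction l with
  | nil => intro bs; rfl
  | cons t rest ih =>
    intro bs
    rw [List.foldl_cons, ih, PySem.List.length_pySetD]

-- one distribution pass, seen bucket by bucket: bucket j collects exactly the items resolving to j
theorem dist_getD {σ τ : Type} (f : σ → τ → σ) (dflt : σ) (g : τ → Int) :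
    ∀ (l : List τ) (bs : List σ),
      (∀ t ∈ l, PySem.Raise.InRange bs.length (g t)) → ∀ j, j < bs.length →
      (l.foldl (fun bs t =>
          PySem.List.pySetD bs (g t) (f (PySem.List.pyGetD bs (g t) dflt) t)) bs).getD j dflt =
      (l.filter (fun t => pvRes bs.length (g t) == j)).foldl f (bs.getD j dflt) := by
  intro l
  induction l with
  | nil => intro bs _ j hj; rfl
  | cons t rest ih =>
    intro bs hin j hj
    have ht := hin t (List.mem_cons_self ..)
    have hr : pvRes bs.length (g t) < bs.length := pvRes_lt ht
    simp only [List.foldl_cons, List.filter_cons]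
    rw [pySetD_eq_set _ ht, pyGetD_eq_getD _ ht]
    have hlen : (bs.set (pvRes bs.length (g t)) (f (bs.getD (pvRes bs.length (g t)) dflt) t)).length = bs.length := by simp
    rw [ih _ (by intro u hu; rw [hlen]; exact hin u (List.mem_cons_of_mem _ hu)) j (by omega)]
    rw [hlen]
    by_cases hcase : pvRes bs.length (g t) = j
    · simp [hcase, List.getD, hj]
    · have hjr : j ≠ pvRes bs.length (g t) := fun h => hcase h.symm
      simp [List.getD, hcase]

-- inserting pairwise-distinct fresh keys into a dict appends them in order
theorem dict_foldl_insert_items {κ : Type} [BEq κ] [LawfulBEq κ] :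
    ∀ (l : List κ) (d : PySem.Dict κ Int), l.Nodup → (∀ t ∈ l, d.contains t = false) →
      (l.foldl (fun d t => d.insert t 0) d).items = d.items ++ l.map (fun t => (t, 0)) := by
  intro l
  induction l with
  | nil => intro d _ _; simp
  | cons t rest ih =>
    intro d hnd hfresh
    have hft := hfresh t (List.mem_cons_self ..)
    simp only [List.foldl_cons, List.map_cons]
    have hins : (d.insert t 0).items = d.items ++ [(t, 0)] := by
      simp [PySem.Dict.insert, hft]
    rw [ih (d.insert t 0) (List.Nodup.of_cons hnd)]
    · rw [hins]; simp
    · intro u hu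
      simp [PySem.Dict.contains, hins]
      constructor
      · have := hfresh u (List.mem_cons_of_mem _ hu)
        simpa [PySem.Dict.contains] using this
      · intro h; subst h
        exact absurd hu (List.nodup_cons.mp hnd).1

theorem insertBy_of_forall {α : Type} (bf : α → α → Bool) (x : α) (zs : List α)
    (h : ∀ z ∈ zs, bf x z = true) : PySem.List.insertBy bf x zs = x :: zs := by
  cases zs with
  | nil => rfl
  | cons z t => simp [PySem.List.insertBy, h z (List.mem_cons_self ..)]

theorem filter_insertBy {α κ : Type} [LinearOrder κ] (key : α → κ) (p : α → Bool) (x : α) :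
    ∀ (ys : List α), ys.Pairwise (fun a b => key b ≤ key a) →
      (PySem.List.insertBy (fun a b => decide (key b < key a)) x ys).filter p =
      (if p x then PySem.List.insertBy (fun a b => decide (key b < key a)) x (ys.filter p)
       else ys.filter p) := by
  intro ys
  induction ys with
  | nil =>
    intro _
    simp [PySem.List.insertBy, List.filter]
    split_ifs with hp <;> simp [hp]
  | cons y t ih =>
    intro hpw
    have hpwt : t.Pairwise (fun a b => key b ≤ key a) := hpw.of_cons
    have hyt : ∀ z ∈ t, key z ≤ key y := fun z hz => List.rel_of_pairwise_cons hpw hz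
    by_cases hb : key y < key x
    · -- x is inserted at the head
      have h1 : PySem.List.insertBy (fun a b => decide (key b < key a)) x (y :: t) = x :: y :: t := by
        simp [PySem.List.insertBy, hb]
      rw [h1]
      have hall : ∀ z ∈ (y :: t).filter p, key z < key x := by
        intro z hz
        have hz' := List.mem_of_mem_filter hz
        rcases List.mem_cons.mp hz' with h | h
        · exact h ▸ hb
        · exact lt_of_le_of_lt (hyt z h) hb
      rw [insertBy_of_forall _ _ _ (fun z hz => by simpa using hall z hz)]
      by_cases hp : p x <;> simp [List.filter_cons, hp]
    · -- x goes further in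
      have h1 : PySem.List.insertBy (fun a b => decide (key b < key a)) x (y :: t) =
          y :: PySem.List.insertBy (fun a b => decide (key b < key a)) x t := by
        simp [PySem.List.insertBy, hb]
      rw [h1]
      by_cases hpy : p y
      · have h2 : (y :: t).filter p = y :: t.filter p := by simp [hpy]
        rw [List.filter_cons_of_pos hpy, ih hpwt, h2]
        by_cases hp : p x
        · simp only [hp, if_true]
          have h3 : PySem.List.insertBy (fun a b => decide (key b < key a)) x (y :: t.filter p) =
              y :: PySem.List.insertBy (fun a b => decide (key b < key a)) x (t.filter p) := by
            simp [PySem.List.insertBy, hb]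
          rw [h3]
        · simp [hp]
      · have h2 : (y :: t).filter p = t.filter p := by simp [hpy]
        rw [List.filter_cons_of_neg hpy, ih hpwt, h2]

-- a stable descending sort commutes with filtering
theorem filter_sorted_rev {α κ : Type} [LinearOrder κ] (key : α → κ) (p : α → Bool)
    (xs : List α) :
    (PySem.List.sorted xs key true).filter p = PySem.List.sorted (xs.filter p) key true := by
  induction xs using List.reverseRecOn with
  | nil => rfl
  | append_singleton xs x ih =>
    rw [PySem.List.sorted_rev_eq_foldl_insertBy, PySem.List.sorted_rev_eq_foldl_insertBy] at *
    rw [List.filter_append, List.foldl_append]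
    simp only [List.foldl_cons, List.foldl_nil]
    rw [filter_insertBy key p x _ (by
      have := PySem.List.sorted_pairwise_rev xs key
      rwa [PySem.List.sorted_rev_eq_foldl_insertBy] at this)]
    rw [ih]
    by_cases hp : p x
    · simp [hp]
    · simp [hp]


-- the two distribution loops of the ports, specialised
theorem distA_len (l : List (Int × Int × Int)) (bs : List (PySem.Dict (Int × Int × Int) Int)) :
    (l.foldl (fun ds t => PySem.List.pySetD ds (t.2.1 - 1)
        ((PySem.List.pyGetD ds (t.2.1 - 1) PySem.Dict.empty).insert t 0)) bs).length = bs.length :=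
  dist_length (fun d t => d.insert t 0) PySem.Dict.empty (fun t => t.2.1 - 1) l bs

theorem distB_len (l : List (Int × Int × Int)) (bs : List (List (Int × Int × Int))) :
    (l.foldl (fun bs t => PySem.List.pySetD bs (t.2.1 - 1)
        (PySem.List.pyGetD bs (t.2.1 - 1) [] ++ [t])) bs).length = bs.length :=
  by
  have h := dist_length (fun (acc : List (Int × Int × Int)) t => acc ++ [t])
    ([] : List (Int × Int × Int)) (fun t => t.2.1 - 1) l bs
  simpa using h

theorem distA_getD (l : List (Int × Int × Int)) (bs : List (PySem.Dict (Int × Int × Int) Int))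
    (hin : ∀ t ∈ l, PySem.Raise.InRange bs.length (t.2.1 - 1)) (j : Nat) (hj : j < bs.length) :
    (l.foldl (fun ds t => PySem.List.pySetD ds (t.2.1 - 1)
        ((PySem.List.pyGetD ds (t.2.1 - 1) PySem.Dict.empty).insert t 0)) bs).getD j PySem.Dict.empty =
    (l.filter (fun t => pvRes bs.length (t.2.1 - 1) == j)).foldl
      (fun d t => d.insert t 0) (bs.getD j PySem.Dict.empty) :=
  dist_getD (fun d t => d.insert t 0) PySem.Dict.empty (fun t => t.2.1 - 1) l bs hin j hj

theorem distB_getD (l : List (Int × Int × Int)) (bs : List (List (Int × Int × Int)))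
    (hin : ∀ t ∈ l, PySem.Raise.InRange bs.length (t.2.1 - 1)) (j : Nat) (hj : j < bs.length) :
    (l.foldl (fun bs t => PySem.List.pySetD bs (t.2.1 - 1)
        (PySem.List.pyGetD bs (t.2.1 - 1) [] ++ [t])) bs).getD j [] =
    (l.filter (fun t => pvRes bs.length (t.2.1 - 1) == j)).foldl
      (fun acc t => acc ++ [t]) (bs.getD j []) :=
  by
  have h := dist_getD (fun (acc : List (Int × Int × Int)) t => acc ++ [t])
    ([] : List (Int × Int × Int)) (fun t => t.2.1 - 1) l bs hin j hj
  simpa using h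

-- bucket j of a constant initial list
theorem getD_map_const {α β : Type} (l : List α) (c : β) (d : β) (j : Nat) (hj : j < l.length) :
    (l.map (fun _ => c)).getD j d = c := by
  simp [List.getD, hj]

theorem pvRes_coe {n j : Nat} (hj : j < n) : pvRes n (j : Int) = j := by
  unfold pvRes PySem.List.pyIdx?
  split_ifs with h1 h2 <;> simp <;> omega

-- ===== VERDICT (by name: the statement is the Claim_ definition above) =====
theorem split_by_topic_spec : Claim_equal_split_by_topic := by
  intro k bag hdom hpre
  unfold Spec_split_by_topic split_by_topic split_by_topic_alt
  dsimp only
  obtain ⟨hnodup, hrange⟩ := hpre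
  have hK : ∀ t ∈ bag, PySem.Raise.InRange k.toNat (t.2.1 - 1) := by
    intro t ht
    obtain ⟨h1, h2⟩ := hrange t ht
    exact ⟨by omega, by omega⟩
  have hlen0 : ((PySem.List.pyRange 0 k 1).map
      (fun _ => (PySem.Dict.empty : PySem.Dict (Int × Int × Int) Int))).length = k.toNat := by
    simp [PySem.List.length_pyRange_one]
  have hlenB : ((PySem.List.pyRange 0 k 1).map
      (fun _ => ([] : List (Int × Int × Int)))).length = k.toNat := by
    simp [PySem.List.length_pyRange_one]
  rw [PySem.List.foldl_append_singleton_eq_map, List.nil_append]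
  apply List.ext_getElem
  · rw [List.length_map,
        distB_len, hlenB, PySem.List.length_pyRange_one]
    simp
  · intro j hjA hjB
    have hjK : j < k.toNat := by
      simpa [PySem.List.length_pyRange_one] using hjA
    -- A side
    have hdsLen : (bag.foldl (fun ds t =>
        PySem.List.pySetD ds (t.2.1 - 1)
          ((PySem.List.pyGetD ds (t.2.1 - 1) PySem.Dict.empty).insert t 0))
        ((PySem.List.pyRange 0 k 1).map
          (fun _ => (PySem.Dict.empty : PySem.Dict (Int × Int × Int) Int)))).length = k.toNat := by
      rw [distA_len, hlen0]
    rw [List.getElem_map, PySem.List.getElem_pyRange_one]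
    have hjc : (0 : Int) + (j : Int) = ((j : Nat) : Int) := by omega
    rw [hjc]
    rw [pyGetD_eq_getD _ (by rw [hdsLen]; exact ⟨by omega, by omega⟩)]
    rw [hdsLen, pvRes_coe hjK]
    rw [distA_getD bag _ (by rw [hlen0]; exact hK) j (by rw [hlen0]; exact hjK)]
    rw [getD_map_const _ _ _ j (by simpa [PySem.List.length_pyRange_one] using hjK)]
    simp only [hlen0]
    -- the dict bucket's keys are exactly the filtered items
    have hfilnd : (bag.filter (fun t => pvRes k.toNat (t.2.1 - 1) == j)).Nodup :=
      (List.Nodup.of_map _ hnodup).filter _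
    have hkeys : ((bag.filter (fun t => pvRes k.toNat (t.2.1 - 1) == j)).foldl
        (fun d t => d.insert t 0)
        (PySem.Dict.empty : PySem.Dict (Int × Int × Int) Int)).keys =
        bag.filter (fun t => pvRes k.toNat (t.2.1 - 1) == j) := by
      unfold PySem.Dict.keys
      rw [dict_foldl_insert_items _ _ hfilnd (by intro u hu; rfl)]
      simp only [PySem.Dict.empty, List.nil_append, List.map_map]
      exact List.map_id _
    rw [hkeys]
    -- B side
    rw [← List.getD_eq_getElem _ ([] : List (Int × Int × Int)) hjB]
    rw [distB_getD _ _
        (by rw [hlenB]; intro t ht; exact hK t ((PySem.List.mem_sorted _ _ _ _).mp ht)) j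
        (by rw [hlenB]; exact hjK)]
    rw [getD_map_const _ _ _ j (by simpa [PySem.List.length_pyRange_one] using hjK)]
    simp only [hlenB]
    rw [PySem.List.foldl_append_singleton, List.nil_append]
    rw [filter_sorted_rev]
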